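-- pv_equiv track=rewrite | github.com/rrwt/daily-coding-challenge | daily_problems/problem_201_to_300/220.py | _max_amount_rec
-- ===== SOURCE A (Python) =====
-- from typing import List, Tuple
--
-- def _max_amount_rec(row: List[int], size: int, row_sum: int) -> Tuple[int, int]:
--     """
--     At each turn, you try to maximize current + rest of the pile for you.
--     :returns: tuple[value for curr player, value for other player] with given elements
--     """
--     if size == 1:
--         return row_sum, 0
--     if size == 2:
--         return max(row), min(row)
--
--     first = row[0] + _max_amount_rec(row[1:], size - 1, row_sum - row[0])[1]
--     second = row[-1] + _max_amount_rec(row[:-1], size - 1, row_sum - row[-1])[1]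
--     max_val = max(first, second)
--     return max_val, row_sum - max_val
-- ===== SOURCE B (Python) =====
-- from typing import List, Tuple
--
-- def _max_amount_rec(row: List[int], size: int, row_sum: int) -> Tuple[int, int]:
--     """Bottom-up interval DP (layered table) instead of the exponential recursion."""
--     if size == 1:
--         return row_sum, 0
--     if size == 2:
--         return max(row), min(row)
--     m = len(row)
--     d = size - 2
--     # deepest layer: intervals row[i : m-(d-i)], where the recursion depth reaches size 2
--     layer = [(max(row[i:m - (d - i)]), min(row[i:m - (d - i)])) for i in range(d + 1)]
--     for t in range(d):
--         tt = d - 1 - t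
--         new = []
--         for i in range(tt + 1):
--             j = tt - i
--             s = row_sum - sum(row[:i]) - sum(row[m - j:])
--             first = row[i] + layer[i + 1][1]
--             second = row[m - j - 1] + layer[i][1]
--             mx = max(first, second)
--             new.append((mx, s - mx))
--         layer = new
--     return layer[0]
-- ===== Notes on version B (the rewrite author's own statement) =====
-- stated objective: faster
-- what changed: Replaces A's exponential two-branch recursion over list slices with a bottom-up interval dynamic program that builds layers of (current, other) pairs for all reachable contiguous sub-rows, from the deepest layer up to the full row; intended as faster (asymptotically: A times out already at n=64 where B returns in under a millisecond), but a timing run could not confirm the label because A finishes on too few timed inputs to measure a ratio.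
import Mathlib
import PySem

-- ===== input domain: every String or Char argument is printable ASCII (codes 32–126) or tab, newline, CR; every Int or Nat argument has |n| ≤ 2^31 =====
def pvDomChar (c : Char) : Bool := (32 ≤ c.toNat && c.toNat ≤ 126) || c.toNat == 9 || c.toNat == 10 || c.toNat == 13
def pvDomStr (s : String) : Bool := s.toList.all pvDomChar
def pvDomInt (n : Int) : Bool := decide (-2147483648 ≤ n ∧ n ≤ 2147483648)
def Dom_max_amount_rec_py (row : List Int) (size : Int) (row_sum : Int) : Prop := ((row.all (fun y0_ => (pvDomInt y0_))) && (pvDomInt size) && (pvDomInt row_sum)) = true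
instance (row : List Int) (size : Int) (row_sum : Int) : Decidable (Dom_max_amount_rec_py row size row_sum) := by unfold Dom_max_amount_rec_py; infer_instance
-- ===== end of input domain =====

-- B replaces A's exponential two-branch recursion by a bottom-up interval DP over layers of
-- contiguous sub-rows, returning the same pair; the Python tuple result is ported as a 2-element List Int.

-- ===== PORT A =====
-- result[1] of a recursive call (the Python tuple indexed at 1)
def pvSnd (l : List Int) : Int := PySem.List.pyGetD l 1 0

def max_amount_rec_py (row : List Int) (size : Int) (row_sum : Int) : List Int :=
  if size = 1 then [row_sum, 0]
  else if size = 2 then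
    match PySem.List.max? row (fun y => y), PySem.List.min? row (fun y => y) with
    | some a, some b => [a, b]
    | _, _ => []  -- max()/min() of empty list: ValueError, outside Pre_
  else
    match h1 : PySem.List.pyGet? row 0, h2 : PySem.List.pyGet? row (-1) with
    | some f, some l =>
      let first := f + pvSnd (max_amount_rec_py (PySem.List.slice row (some 1) none) (size - 1) (row_sum - f))
      let second := l + pvSnd (max_amount_rec_py (PySem.List.slice row none (some (-1))) (size - 1) (row_sum - l))
      let max_val := max first second
      [max_val, row_sum - max_val]
    | _, _ => []  -- row[0]/row[-1] IndexError, outside Pre_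
termination_by row.length
decreasing_by
  · have : row ≠ [] := by
      intro h; subst h; simp [PySem.List.pyGet?] at h1
    simp [PySem.List.slice_from_one]
    cases row with
    | nil => exact absurd rfl this
    | cons a t => simp
  · have hne : row ≠ [] := by
      intro h; subst h; simp [PySem.List.pyGet?] at h1
    simp [PySem.List.slice_to_neg_one]
    cases row with
    | nil => exact absurd rfl hne
    | cons a t => simp

-- ===== PORT B =====
-- max(xs)/min(xs); the default 0 is only reached on the empty list, where Python raises (outside Pre_)
def pvMaxD (l : List Int) : Int := (PySem.List.max? l (fun y => y)).getD 0
def pvMinD (l : List Int) : Int := (PySem.List.min? l (fun y => y)).getD 0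

-- body of B's outer loop: from the layer of depth tt+1 build the layer of depth tt = d-1-t
def pvStepB (row : List Int) (row_sum : Int) (m d : Int) (layer : List (Int × Int)) (t : Int) : List (Int × Int) :=
  let tt := d - 1 - t
  (PySem.List.pyRange 0 (tt + 1) 1).map (fun i =>
    let j := tt - i
    let s := row_sum - (PySem.List.slice row none (some i)).sum
              - (PySem.List.slice row (some (m - j)) none).sum
    let first := PySem.List.pyGetD row i 0 + (PySem.List.pyGetD layer (i + 1) (0, 0)).2
    let second := PySem.List.pyGetD row (m - j - 1) 0 + (PySem.List.pyGetD layer i (0, 0)).2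
    let mx := max first second
    (mx, s - mx))

def max_amount_rec_py_alt (row : List Int) (size : Int) (row_sum : Int) : List Int :=
  if size = 1 then [row_sum, 0]
  else if size = 2 then
    [pvMaxD row, pvMinD row]
  else
    let m : Int := row.length
    let d : Int := size - 2
    let base : List (Int × Int) :=
      (PySem.List.pyRange 0 (d + 1) 1).map (fun i =>
        (pvMaxD (PySem.List.slice row (some i) (some (m - (d - i)))),
         pvMinD (PySem.List.slice row (some i) (some (m - (d - i))))))
    let final : List (Int × Int) :=
      (PySem.List.pyRange 0 d 1).foldl (pvStepB row row_sum m d) base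
    match final with
    | p :: _ => [p.1, p.2]
    | [] => []  -- unreachable: every layer has at least one entry

-- ===== PRECONDITION & SPEC =====
-- Pre_ is exactly the set of inputs on which Python A returns: elsewhere A raises
-- (IndexError from row[0]/row[-1], or ValueError from max()/min() of an empty list).
def Pre_max_amount_rec_py (row : List Int) (size : Int) (row_sum : Int) : Prop :=
  size = 1 ∨ (size = 2 ∧ row ≠ []) ∨ (3 ≤ size ∧ size - 1 ≤ (row.length : Int))
instance (row : List Int) (size : Int) (row_sum : Int) : Decidable (Pre_max_amount_rec_py row size row_sum) := by unfold Pre_max_amount_rec_py; infer_instance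
def pvWitness_max_amount_rec_py : List Int × Int × Int := ([3, 9, 1, 2], 4, 15)

def Spec_max_amount_rec_py (row : List Int) (size : Int) (row_sum : Int) (out : List Int) : Prop := out = max_amount_rec_py_alt row size row_sum
instance (row : List Int) (size : Int) (row_sum : Int) (out : List Int) : Decidable (Spec_max_amount_rec_py row size row_sum out) := by unfold Spec_max_amount_rec_py; infer_instance

-- ===== CLAIM (what is proved, stated in full; the proofs are below) =====
def Claim_equal_max_amount_rec_py : Prop := ∀ (row : List Int) (size : Int) (row_sum : Int), Dom_max_amount_rec_py row size row_sum → Pre_max_amount_rec_py row size row_sum → Spec_max_amount_rec_py row size row_sum (max_amount_rec_py row size row_sum)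

-- ===== LEMMAS AND PROOFS =====

-- the contiguous sub-row reached after dropping i elements at the front and j at the back
def pvSeg (row : List Int) (i j : Nat) : List Int :=
  (row.drop i).take (row.length - j - i)

-- the row_sum argument A carries for that sub-row
def pvS (row : List Int) (row_sum : Int) (i j : Nat) : Int :=
  row_sum - (row.take i).sum - (row.drop (row.length - j)).sum

-- the value A's recursion computes on pvSeg row i j, as a pair, indexed by remaining depth k
def pvG (row : List Int) (row_sum : Int) : Nat → Nat → Nat → Int × Int
  | 0, i, j => (pvMaxD (pvSeg row i j), pvMinD (pvSeg row i j))
  | Nat.succ k, i, j =>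
      let f := row.getD i 0 + (pvG row row_sum k (i + 1) j).2
      let s := row.getD (row.length - j - 1) 0 + (pvG row row_sum k i (j + 1)).2
      (max f s, pvS row row_sum i j - max f s)

-- B's layer of depth t (entries i = 0..t), each entry the A-value of pvSeg row i (t-i)
def pvLayer (row : List Int) (row_sum : Int) (d t : Nat) : List (Int × Int) :=
  (List.range (t + 1)).map (fun i => pvG row row_sum (d - t) i (t - i))

lemma pvSeg_length (row : List Int) (i j : Nat) :
    (pvSeg row i j).length = row.length - j - i := by
  simp [pvSeg]; omega

lemma pvSnd_pair (a b : Int) : pvSnd [a, b] = b := by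
  simp [pvSnd, PySem.List.pyGetD, PySem.List.pyIdx?, PySem.List.pyGet?]

lemma A_eq_g (row : List Int) (row_sum : Int) :
    ∀ (k i j : Nat), i + j + k + 1 ≤ row.length →
    max_amount_rec_py (pvSeg row i j) ((k : Int) + 2) (pvS row row_sum i j)
      = [(pvG row row_sum k i j).1, (pvG row row_sum k i j).2] := by
  intro k
  induction k with
  | zero =>
    intro i j h
    have hne : pvSeg row i j ≠ [] := by
      have := pvSeg_length row i j
      intro hnil; rw [hnil] at this; simp at this; omega
    rw [max_amount_rec_py]
    rw [if_neg (by norm_num), if_pos (by norm_num)]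
    cases hmax : PySem.List.max? (pvSeg row i j) (fun y => y) with
    | none => exact absurd ((PySem.List.max?_eq_none_iff _ _).mp hmax) hne
    | some a =>
      cases hmin : PySem.List.min? (pvSeg row i j) (fun y => y) with
      | none => exact absurd ((PySem.List.min?_eq_none_iff _ _).mp hmin) hne
      | some b => simp [pvG, pvMaxD, pvMinD, hmax, hmin]
  | succ k ih =>
    intro i j h
    have hlen : (pvSeg row i j).length = row.length - j - i := pvSeg_length row i j
    have hpos : 0 < (pvSeg row i j).length := by omega
    have hi : i < row.length := by omega
    have hj : row.length - j - 1 < row.length := by omega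
    -- scrutinee values
    have hg0 : PySem.List.pyGet? (pvSeg row i j) 0 = some (row.getD i 0) := by
      rw [PySem.List.pyGet?_zero]
      simp only [pvSeg, List.getElem?_take, List.getElem?_drop]
      rw [if_pos (by omega), Nat.add_zero, List.getElem?_eq_getElem hi,
        List.getD_eq_getElem _ _ hi]
    have hg1 : PySem.List.pyGet? (pvSeg row i j) (-1) = some (row.getD (row.length - j - 1) 0) := by
      rw [PySem.List.pyGet?_neg_one, List.getLast?_eq_getElem?, hlen]
      simp only [pvSeg, List.getElem?_take, List.getElem?_drop]
      rw [if_pos (by omega), show i + (row.length - j - i - 1) = row.length - j - 1 from by omega,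
        List.getElem?_eq_getElem hj, List.getD_eq_getElem _ _ hj]
    -- slice identities
    have hs1 : PySem.List.slice (pvSeg row i j) (some 1) none = pvSeg row (i + 1) j := by
      rw [PySem.List.slice_from_one, pvSeg, pvSeg, ← List.drop_one, List.drop_take,
        List.drop_drop, show row.length - j - i - 1 = row.length - j - (i + 1) from by omega]
    have hs2 : PySem.List.slice (pvSeg row i j) none (some (-1)) = pvSeg row i (j + 1) := by
      rw [PySem.List.slice_to_neg_one, List.dropLast_eq_take, hlen, pvSeg, pvSeg,
        List.take_take]
      congr 1
      omega
    -- row_sum bookkeeping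
    have hsum1 : pvS row row_sum i j - row.getD i 0 = pvS row row_sum (i + 1) j := by
      rw [List.getD_eq_getElem _ _ hi]
      simp [pvS, List.sum_take_succ row i hi]
      ring
    have hsum2 : pvS row row_sum i j - row.getD (row.length - j - 1) 0
        = pvS row row_sum i (j + 1) := by
      have hd : row.drop (row.length - (j + 1))
          = row[row.length - j - 1]'hj :: row.drop (row.length - j) := by
        rw [show row.length - (j + 1) = row.length - j - 1 from by omega,
          List.drop_eq_getElem_cons hj,
          show row.length - j - 1 + 1 = row.length - j from by omega]
      rw [List.getD_eq_getElem _ _ hj]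
      simp [pvS, hd]
      ring
    rw [max_amount_rec_py]
    rw [if_neg (by push_cast; omega), if_neg (by push_cast; omega)]
    split
    case _ f l hf hl =>
      rw [hg0] at hf
      rw [hg1] at hl
      injection hf with hf
      injection hl with hl
      subst hf; subst hl
      have hsize : ((k + 1 : Nat) : Int) + 2 - 1 = (k : Int) + 2 := by push_cast; ring
      rw [hs1, hs2, hsize, hsum1, hsum2,
        ih (i + 1) j (by omega), ih i (j + 1) (by omega), pvSnd_pair, pvSnd_pair]
      simp [pvG]
    case _ hno =>
      exact absurd (hno _ _ hg0 hg1) not_false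

lemma base_eq (row : List Int) (row_sum : Int) (dn : Nat) (hdm : dn ≤ row.length) :
    (PySem.List.pyRange 0 ((dn : Int) + 1) 1).map (fun i =>
        (pvMaxD (PySem.List.slice row (some i) (some ((row.length : Int) - ((dn : Int) - i)))),
         pvMinD (PySem.List.slice row (some i) (some ((row.length : Int) - ((dn : Int) - i))))))
      = pvLayer row row_sum dn dn := by
  rw [show (dn : Int) + 1 = ((dn + 1 : Nat) : Int) from by push_cast; ring,
    PySem.List.pyRange_zero_natCast, List.map_map]
  unfold pvLayer
  apply List.map_congr_left
  intro i hi
  have hi' : i ≤ dn := by simpa [Nat.lt_succ_iff] using List.mem_range.mp hi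
  have hb : (row.length : Int) - ((dn : Int) - (i : Nat)) = ((row.length - (dn - i) : Nat) : Int) := by
    omega
  simp only [Function.comp_apply, hb, PySem.List.slice_natCast]
  simp [pvG, pvSeg]

lemma step_eq (row : List Int) (row_sum : Int) (dn t : Nat) (ht : t < dn)
    (hdm : dn + 1 ≤ row.length) :
    pvStepB row row_sum (row.length : Int) (dn : Int) (pvLayer row row_sum dn (dn - t)) (t : Int)
      = pvLayer row row_sum dn (dn - t - 1) := by
  have hntt : (dn : Int) - 1 - (t : Int) = ((dn - t - 1 : Nat) : Int) := by omega
  simp only [pvStepB]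
  rw [hntt, show ((dn - t - 1 : Nat) : Int) + 1 = ((dn - t : Nat) : Int) from by omega,
    PySem.List.pyRange_zero_natCast, List.map_map]
  conv_rhs => rw [pvLayer]
  rw [show dn - t - 1 + 1 = dn - t from by omega]
  apply List.map_congr_left
  intro i hi
  have hi' : i ≤ dn - t - 1 := by
    have := List.mem_range.mp hi; omega
  have hj : ((dn - t - 1 : Nat) : Int) - (i : Nat) = ((dn - t - 1 - i : Nat) : Int) := by omega
  have hmj : (row.length : Int) - ((dn - t - 1 - i : Nat) : Int)
      = ((row.length - (dn - t - 1 - i) : Nat) : Int) := by omega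
  have hip1 : ((i : Nat) : Int) + 1 = ((i + 1 : Nat) : Int) := by omega
  simp only [Function.comp_apply, hj, hmj, hip1, PySem.List.slice_to_natCast,
    PySem.List.slice_from_natCast, PySem.List.pyGetD_natCast]
  rw [pvLayer, PySem.List.getD_map_range _ _ _ _ (by omega),
    PySem.List.getD_map_range _ _ _ _ (by omega)]
  rw [show dn - (dn - t) = t from by omega,
    show dn - (dn - t - 1) = t + 1 from by omega]
  simp only [pvG, pvS]
  rw [show dn - t - (i + 1) = dn - t - 1 - i from by omega,
    show dn - t - i = dn - t - 1 - i + 1 from by omega,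
    show ((row.length - (dn - t - 1 - i) : Nat) : Int) - 1
        = ((row.length - (dn - t - 1 - i) - 1 : Nat) : Int) from by omega,
    PySem.List.pyGetD_natCast]

lemma fold_eq (row : List Int) (row_sum : Int) (dn : Nat) (hdm : dn + 1 ≤ row.length) :
    ∀ c, c ≤ dn →
    (List.range c).foldl (fun (l : List (Int × Int)) (t : Nat) => pvStepB row row_sum (row.length : Int) (dn : Int) l (t : Int))
        (pvLayer row row_sum dn dn)
      = pvLayer row row_sum dn (dn - c) := by
  intro c
  induction c with
  | zero => intro _; simp
  | succ c ihc =>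
    intro hc
    rw [List.range_succ, List.foldl_append, ihc (by omega)]
    simp only [List.foldl_cons, List.foldl_nil]
    rw [step_eq row row_sum dn c (by omega) hdm,
      show dn - c - 1 = dn - (c + 1) from by omega]

lemma B_main (row : List Int) (size row_sum : Int) (h3 : 3 ≤ size)
    (hm : size - 1 ≤ (row.length : Int)) (dn : Nat) (hd : (dn : Int) = size - 2) :
    max_amount_rec_py_alt row size row_sum
      = [(pvG row row_sum dn 0 0).1, (pvG row row_sum dn 0 0).2] := by
  have hdm : dn + 1 ≤ row.length := by omega
  simp only [max_amount_rec_py_alt]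
  rw [if_neg (by omega), if_neg (by omega), ← hd]
  rw [base_eq row row_sum dn (by omega), PySem.List.pyRange_zero_natCast, List.foldl_map,
    fold_eq row row_sum dn hdm dn le_rfl]
  rw [show pvLayer row row_sum dn (dn - dn) = [pvG row row_sum dn 0 0] from by
    simp [pvLayer, List.range_succ]]

-- ===== VERDICT (by name: the statement is the Claim_ definition above) =====
theorem max_amount_rec_py_spec : Claim_equal_max_amount_rec_py := by
  intro row size row_sum _ hpre
  unfold Spec_max_amount_rec_py
  rcases hpre with h1 | ⟨h2, hne⟩ | ⟨h3, hm⟩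
  · subst h1
    rw [max_amount_rec_py, max_amount_rec_py_alt]
    norm_num
  · subst h2
    rw [max_amount_rec_py, max_amount_rec_py_alt]
    norm_num
    cases hmax : PySem.List.max? row (fun y => y) with
    | none => exact absurd ((PySem.List.max?_eq_none_iff _ _).mp hmax) hne
    | some a =>
      cases hmin : PySem.List.min? row (fun y => y) with
      | none => exact absurd ((PySem.List.min?_eq_none_iff _ _).mp hmin) hne
      | some b => simp [pvMaxD, pvMinD, hmax, hmin]
  · have hd : ((size - 2).toNat : Int) = size - 2 := Int.toNat_of_nonneg (by omega)
    have hA := A_eq_g row row_sum (size - 2).toNat 0 0 (by omega)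
    rw [show pvSeg row 0 0 = row from by simp [pvSeg],
      show pvS row row_sum 0 0 = row_sum from by simp [pvS],
      show (((size - 2).toNat : Nat) : Int) + 2 = size from by omega] at hA
    rw [hA, B_main row size row_sum h3 hm (size - 2).toNat hd]
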